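-- pv_equiv track=rewrite | github.com/willizdev/compuba | Algoritmos/Introducción a la Programación/Python/Guías/ Guía 7 - Funciones sobre listas (tipos complejos) /p7.py | pos_secuencia_ordenada_mas_larga
-- ===== SOURCE A (Python) =====
-- def maximo(s: list[int]) -> int:
--     l: list[int] = s.copy()
--     m: int = l.pop()
--     for i in l:
--         if i > m:
--             m = i
--     return m
--
-- def pos_maximo(s: list[int]) -> int:
--     if len(s) == 0:
--         return -1
--     m: int = maximo(s)
--     for i in range(0, len(s)):
--         if s[i] == m:
--             return i
--
-- def pos_secuencia_ordenada_mas_larga(s: list[int]) -> int: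
--
--     def elementos_ordenados_desde_pos(l: list[int], p: int) -> int:
--         contador: int = 0
--         previo: int = l[p]
--         for i in range(p, len(l)):
--             if l[i] >= previo:
--                 contador += 1
--                 previo = l[i]
--             else:
--                 break
--         return contador
--
--     posiciones: list[int] = []
--     for i in range(0, len(s)):
--         posiciones.append(elementos_ordenados_desde_pos(s, i))
--
--     return pos_maximo(posiciones)
-- ===== SOURCE B (Python) =====
-- def pos_secuencia_ordenada_mas_larga(s: list[int]) -> int:
--     # One backward pass computing the length of the non-decreasing run starting
--     # at each position, then one forward pass taking the leftmost argmax. O(n).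
--     runs = []
--     prev_run = 0
--     prev_val = None
--     for x in reversed(s):
--         if prev_val is not None and x <= prev_val:
--             prev_run += 1
--         else:
--             prev_run = 1
--         runs.append(prev_run)
--         prev_val = x
--     runs.reverse()
--     best = -1
--     best_len = 0
--     for i, r in enumerate(runs):
--         if r > best_len:
--             best, best_len = i, r
--     return best
-- ===== Notes on version B (the rewrite author's own statement) =====
-- stated objective: faster
-- what changed: Replaces the per-position rescan of the whole suffix (O(n^2)) by a single backward dynamic-programming pass computing each run length from its right neighbour, followed by one leftmost-argmax scan.
import Mathlib
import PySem

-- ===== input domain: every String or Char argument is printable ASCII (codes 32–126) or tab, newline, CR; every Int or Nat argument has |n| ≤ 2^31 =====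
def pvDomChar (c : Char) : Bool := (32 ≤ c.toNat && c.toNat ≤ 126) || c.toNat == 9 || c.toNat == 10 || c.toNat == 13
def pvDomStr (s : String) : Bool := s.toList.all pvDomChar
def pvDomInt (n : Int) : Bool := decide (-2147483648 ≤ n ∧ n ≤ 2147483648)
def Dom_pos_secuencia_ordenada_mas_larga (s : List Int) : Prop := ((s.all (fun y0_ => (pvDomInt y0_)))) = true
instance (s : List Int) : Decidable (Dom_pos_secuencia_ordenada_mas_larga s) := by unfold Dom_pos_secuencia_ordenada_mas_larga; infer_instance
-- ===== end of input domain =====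

-- B replaces A's quadratic rescan of every suffix by a backward DP pass plus one argmax scan (O(n)).

-- ===== PORT A =====
-- elementos_ordenados_desde_pos: loop body over range(p, len(l)) with break
def pvEodpGo (l : List Int) : List Int → Int → Int → Int
  | [], contador, _ => contador
  | i :: rest, contador, previo =>
    let v := PySem.List.pyGetD l i 0   -- l[i]; every index passed is in range
    if v ≥ previo then pvEodpGo l rest (contador + 1) v else contador

def pvEodp (l : List Int) (p : Int) : Int :=
  -- previo = l[p]; p is always in range at the call sites
  pvEodpGo l (PySem.List.pyRange p (l.length : Int) 1) 0 (PySem.List.pyGetD l p 0)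

def pvMaximo (s : List Int) : Int :=
  -- m = l.pop() (last element; callers only pass nonempty lists), then max loop over the rest
  let m := PySem.List.pyGetD s (-1) 0
  s.dropLast.foldl (fun m i => if i > m then i else m) m

def pvPosMaximoGo (s : List Int) (m : Int) : List Int → Int
  | [] => -1  -- Python falls through returning None; unreachable since m occurs in s
  | i :: rest => if PySem.List.pyGetD s i 0 = m then i else pvPosMaximoGo s m rest

def pvPosMaximo (s : List Int) : Int :=
  if (s.length : Int) = 0 then -1
  else pvPosMaximoGo s (pvMaximo s) (PySem.List.pyRange 0 (s.length : Int) 1)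

def pos_secuencia_ordenada_mas_larga (s : List Int) : Int :=
  let posiciones := (PySem.List.pyRange 0 (s.length : Int) 1).map (fun i => pvEodp s i)
  pvPosMaximo posiciones

-- ===== PORT B =====
-- backward pass over reversed(s): run length at each position from its right neighbour
def pvRunsRevGo : List Int → Int → Option Int → List Int
  | [], _, _ => []
  | x :: rest, prevRun, prevVal =>
    let r := match prevVal with
      | some pv => if x ≤ pv then prevRun + 1 else 1
      | none => 1
    r :: pvRunsRevGo rest r (some x)

-- forward leftmost-argmax scan
def pvArgmaxGo : List Int → Int → Int → Int → Int
  | [], best, _, _ => best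
  | r :: rest, best, bestLen, i =>
    if r > bestLen then pvArgmaxGo rest i r (i + 1)
    else pvArgmaxGo rest best bestLen (i + 1)

def pos_secuencia_ordenada_mas_larga_alt (s : List Int) : Int :=
  let runs := (pvRunsRevGo s.reverse 0 none).reverse
  pvArgmaxGo runs (-1) 0 0

-- ===== PRECONDITION & SPEC =====
def Spec_pos_secuencia_ordenada_mas_larga (s : List Int) (out : Int) : Prop := out = pos_secuencia_ordenada_mas_larga_alt s
instance (s : List Int) (out : Int) : Decidable (Spec_pos_secuencia_ordenada_mas_larga s out) := by unfold Spec_pos_secuencia_ordenada_mas_larga; infer_instance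

-- ===== CLAIM (what is proved, stated in full; the proofs are below) =====
def Claim_equal_pos_secuencia_ordenada_mas_larga : Prop := ∀ (s : List Int), Dom_pos_secuencia_ordenada_mas_larga s → Spec_pos_secuencia_ordenada_mas_larga s (pos_secuencia_ordenada_mas_larga s)

-- ===== LEMMAS AND PROOFS =====

-- Common specification pieces
def cntGo (prev : Int) : List Int → Int
  | [] => 0
  | v :: rest => if v ≥ prev then 1 + cntGo v rest else 0

def runD : List Int → Int
  | [] => 0
  | v :: rest => 1 + cntGo v rest

def runsList (s : List Int) : List Int := (List.range s.length).map (fun i => runD (s.drop i))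

def fIdx (m : Int) : List Int → Int
  | [] => -1
  | v :: rest => if v = m then 0 else 1 + fIdx m rest

def fmA (t : Int) : List Int → Int
  | [] => 0
  | v :: rest => if t < v ∧ rest.all (fun x => decide (x ≤ v)) then 0 else 1 + fmA (max t v) rest

-- ---- A side: the inner counting loop ----
lemma eodpGo_spec : ∀ (k : ℕ) (l : List Int) (i : ℕ) (c prev : Int), l.length ≤ i + k →
    pvEodpGo l (PySem.List.pyRange (i : Int) (l.length : Int) 1) c prev = c + cntGo prev (l.drop i) := by
  intro k
  induction k with
  | zero =>
    intro l i c prev h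
    rw [PySem.List.pyRange_one_eq_nil (by exact_mod_cast h), List.drop_of_length_le (by omega)]
    simp [pvEodpGo, cntGo]
  | succ k ih =>
    intro l i c prev h
    by_cases hi : i < l.length
    · rw [PySem.List.pyRange_one_cons (by exact_mod_cast hi)]
      have hdrop : l.drop i = l[i] :: l.drop (i+1) := List.drop_eq_getElem_cons hi
      have hget : PySem.List.pyGetD l (i : Int) 0 = l[i] := by
        rw [PySem.List.pyGetD_natCast]; exact List.getD_eq_getElem l 0 hi
      simp only [pvEodpGo, hget, hdrop, cntGo]
      by_cases hc : l[i] ≥ prev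
      · rw [if_pos hc, if_pos hc]
        have hcast : ((i:Int) + 1) = ((i+1 : ℕ) : Int) := by push_cast; ring
        rw [hcast, ih l (i+1) (c+1) l[i] (by omega)]
        ring
      · rw [if_neg hc, if_neg hc]; ring
    · rw [PySem.List.pyRange_one_eq_nil (by exact_mod_cast (by omega : l.length ≤ i)),
          List.drop_of_length_le (by omega)]
      simp [pvEodpGo, cntGo]

lemma eodp_spec (l : List Int) (i : ℕ) (h : i < l.length) :
    pvEodp l (i : Int) = runD (l.drop i) := by
  unfold pvEodp
  rw [eodpGo_spec l.length l i (0 : Int) _ (by omega)]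
  have hdrop : l.drop i = l[i] :: l.drop (i+1) := List.drop_eq_getElem_cons h
  have hget : PySem.List.pyGetD l (i : Int) 0 = l[i] := by
    rw [PySem.List.pyGetD_natCast]; exact List.getD_eq_getElem l 0 h
  rw [hget, hdrop]
  simp [cntGo, runD]

lemma posiciones_eq (s : List Int) :
    (PySem.List.pyRange 0 (s.length : Int) 1).map (fun i => pvEodp s i) = runsList s := by
  unfold runsList
  rw [PySem.List.pyRange_one, List.map_map]
  have hlen : ((s.length : Int) - 0).toNat = s.length := by omega
  rw [hlen]
  apply List.map_congr_left
  intro k hk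
  simp only [Function.comp_apply, zero_add]
  exact eodp_spec s k (List.mem_range.mp hk)

-- ---- A side: maximo / pos_maximo ----
lemma foldl_max_mem : ∀ (l : List Int) (a : Int), l.foldl (fun m i => if i > m then i else m) a = a ∨ l.foldl (fun m i => if i > m then i else m) a ∈ l := by
  intro l
  induction l with
  | nil => intro a; left; rfl
  | cons x l ih =>
    intro a
    simp only [List.foldl_cons]
    by_cases hx : x > a
    · rw [if_pos hx]
      rcases ih x with h | h
      · right; rw [h]; exact List.mem_cons_self
      · right; exact List.mem_cons_of_mem _ h
    · rw [if_neg hx]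
      rcases ih a with h | h
      · left; exact h
      · right; exact List.mem_cons_of_mem _ h

lemma le_foldl_max : ∀ (l : List Int) (a : Int), a ≤ l.foldl (fun m i => if i > m then i else m) a ∧ ∀ x ∈ l, x ≤ l.foldl (fun m i => if i > m then i else m) a := by
  intro l
  induction l with
  | nil => intro a; exact ⟨le_refl a, by simp⟩
  | cons x l ih =>
    intro a
    simp only [List.foldl_cons]
    obtain ⟨h1, h2⟩ := ih (if x > a then x else a)
    have hab : a ≤ (if x > a then x else a) ∧ x ≤ (if x > a then x else a) := by
      split_ifs with hx <;> constructor <;> omega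
    refine ⟨le_trans hab.1 h1, ?_⟩
    intro y hy
    rcases List.mem_cons.mp hy with rfl | hy
    · exact le_trans hab.2 h1
    · exact h2 y hy

lemma maximo_mem (l : List Int) (h : l ≠ []) : pvMaximo l ∈ l := by
  unfold pvMaximo
  rw [PySem.List.pyGetD_neg_one l 0 h]
  rcases foldl_max_mem l.dropLast (l.getLast h) with heq | hmem
  · rw [heq]; exact List.getLast_mem h
  · exact List.dropLast_subset l hmem

lemma maximo_bound (l : List Int) (h : l ≠ []) : ∀ x ∈ l, x ≤ pvMaximo l := by
  intro x hx
  unfold pvMaximo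
  rw [PySem.List.pyGetD_neg_one l 0 h]
  obtain ⟨h1, h2⟩ := le_foldl_max l.dropLast (l.getLast h)
  have hsplit : l = l.dropLast ++ [l.getLast h] := (List.dropLast_append_getLast h).symm
  rw [hsplit] at hx
  rcases List.mem_append.mp hx with hx | hx
  · exact h2 x hx
  · rcases List.mem_singleton.mp hx with rfl
    exact h1

lemma posMaximoGo_spec : ∀ (k : ℕ) (s : List Int) (i : ℕ) (m : Int), s.length ≤ i + k → m ∈ s.drop i →
    pvPosMaximoGo s m (PySem.List.pyRange (i : Int) (s.length : Int) 1) = (i : Int) + fIdx m (s.drop i) := by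
  intro k
  induction k with
  | zero =>
    intro s i m h hm
    rw [List.drop_of_length_le (by omega)] at hm
    simp at hm
  | succ k ih =>
    intro s i m h hm
    have hi : i < s.length := by
      by_contra hge
      rw [List.drop_of_length_le (by omega)] at hm
      simp at hm
    rw [PySem.List.pyRange_one_cons (by exact_mod_cast hi)]
    have hdrop : s.drop i = s[i] :: s.drop (i+1) := List.drop_eq_getElem_cons hi
    have hget : PySem.List.pyGetD s (i : Int) 0 = s[i] := by
      rw [PySem.List.pyGetD_natCast]; exact List.getD_eq_getElem s 0 hi
    simp only [pvPosMaximoGo, hget, hdrop, fIdx]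
    by_cases he : s[i] = m
    · rw [if_pos he, if_pos he]; ring
    · rw [if_neg he, if_neg he]
      have hm' : m ∈ s.drop (i+1) := by
        rw [hdrop] at hm
        rcases List.mem_cons.mp hm with rfl | hm'
        · exact absurd rfl he
        · exact hm'
      have hcast : ((i:Int) + 1) = ((i+1 : ℕ) : Int) := by push_cast; ring
      rw [hcast, ih s (i+1) m (by omega) hm']
      push_cast; ring

-- ---- B side: runs list equals runsList ----
def finSt : List Int → Int → Option Int → Int × Option Int
  | [], pr, pv => (pr, pv)
  | x :: rest, pr, pv =>
    finSt rest (match pv with | some p => if x ≤ p then pr + 1 else 1 | none => 1) (some x)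

lemma runsRevGo_append : ∀ (l m : List Int) (pr : Int) (pv : Option Int),
    pvRunsRevGo (l ++ m) pr pv = pvRunsRevGo l pr pv ++ pvRunsRevGo m (finSt l pr pv).1 (finSt l pr pv).2 := by
  intro l
  induction l with
  | nil => intro m pr pv; simp [pvRunsRevGo, finSt]
  | cons x rest ih =>
    intro m pr pv
    simp only [List.cons_append, pvRunsRevGo, finSt]
    rw [ih]

lemma finSt_fst : ∀ (l : List Int) (pr : Int) (pv : Option Int), (finSt l pr pv).1 = (pvRunsRevGo l pr pv).getLastD pr := by
  intro l
  induction l with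
  | nil => intro pr pv; simp [finSt, pvRunsRevGo]
  | cons x rest ih =>
    intro pr pv
    simp only [finSt, pvRunsRevGo]
    rw [ih, List.getLastD_cons]

lemma finSt_snd : ∀ (l : List Int) (pr : Int) (pv : Option Int), (finSt l pr pv).2 = (match l.getLast? with | some y => some y | none => pv) := by
  intro l
  induction l with
  | nil => intro pr pv; simp [finSt]
  | cons x rest ih =>
    intro pr pv
    simp only [finSt]
    rw [ih]
    cases hr : rest.getLast? with
    | none =>
      have : rest = [] := List.getLast?_eq_none_iff.mp hr
      subst this; simp
    | some y =>
      have : (x :: rest).getLast? = some y := by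
        rw [List.getLast?_cons, hr]; rfl
      simp [this]

lemma runsB_eq (s : List Int) : (pvRunsRevGo s.reverse 0 none).reverse = runsList s := by
  induction s with
  | nil => simp [pvRunsRevGo, runsList]
  | cons a rest ih =>
    have runsList_cons : ∀ (b : Int) (t : List Int),
        runsList (b :: t) = runD (b :: t) :: runsList t := by
      intro b t
      unfold runsList
      simp [List.range_succ_eq_map, List.map_map, Function.comp_def]
    rw [List.reverse_cons, runsRevGo_append, List.reverse_append, runsList_cons, ih]
    refine congrArg₂ (· :: ·) ?_ rfl
    have hfst := finSt_fst rest.reverse 0 none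
    have hsnd := finSt_snd rest.reverse 0 none
    have hrev : pvRunsRevGo rest.reverse 0 none = (runsList rest).reverse := by
      rw [← ih, List.reverse_reverse]
    cases rest with
    | nil =>
      simp [finSt, runD, cntGo]
    | cons b r' =>
      have hsnd' : (finSt (b :: r').reverse 0 none).2 = some b := by
        rw [hsnd]
        rw [List.getLast?_reverse]; rfl
      have hfst' : (finSt (b :: r').reverse 0 none).1 = runD (b :: r') := by
        rw [hfst, hrev, List.getLastD_eq_getLast?, List.getLast?_reverse,
            runsList_cons b r']
        rfl
      rw [show (b :: r').reverse = r'.reverse ++ [b] from List.reverse_cons] at hsnd' hfst'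
      simp only [List.reverse_cons, pvRunsRevGo, hsnd', hfst']
      by_cases hab : a ≤ b <;> simp [runD, cntGo, hab, ge_iff_le, add_comm]

-- ---- B side: argmax scan ----
lemma argmax_stay : ∀ (l : List Int) (best bestLen i : Int), (∀ x ∈ l, x ≤ bestLen) →
    pvArgmaxGo l best bestLen i = best := by
  intro l
  induction l with
  | nil => intro best bestLen i _; rfl
  | cons r rest ih =>
    intro best bestLen i hall
    have hr : r ≤ bestLen := hall r List.mem_cons_self
    simp only [pvArgmaxGo, if_neg (by omega : ¬ r > bestLen)]
    exact ih best bestLen (i+1) (fun x hx => hall x (List.mem_cons_of_mem _ hx))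

lemma argmax_fmA : ∀ (l : List Int) (best bestLen i : Int), (∃ x ∈ l, bestLen < x) →
    pvArgmaxGo l best bestLen i = i + fmA bestLen l := by
  intro l
  induction l with
  | nil => intro best bestLen i h; simp at h
  | cons v rest ih =>
    intro best bestLen i h
    simp only [pvArgmaxGo, fmA]
    by_cases hv : bestLen < v
    · rw [if_pos (by omega : v > bestLen)]
      by_cases hall : ∀ x ∈ rest, x ≤ v
      · rw [argmax_stay rest i v (i+1) hall,
            if_pos ⟨hv, List.all_eq_true.mpr (fun x hx => decide_eq_true (hall x hx))⟩]
        ring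
      · rw [not_forall] at hall
        simp only [not_forall, exists_prop, not_le] at hall
        obtain ⟨x, hx, hxv⟩ := hall
        rw [ih i v (i+1) ⟨x, hx, hxv⟩,
            if_neg (by
              rintro ⟨-, hall'⟩
              have := List.all_eq_true.mp hall' x hx
              simp at this; omega)]
        rw [max_eq_right (le_of_lt hv)]
        ring
    · rw [if_neg (by omega : ¬ v > bestLen)]
      have hex : ∃ x ∈ rest, bestLen < x := by
        obtain ⟨x, hx, hxb⟩ := h
        rcases List.mem_cons.mp hx with rfl | hx'
        · omega
        · exact ⟨x, hx', hxb⟩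
      rw [ih best bestLen (i+1) hex,
          if_neg (by rintro ⟨h1, -⟩; omega),
          max_eq_left (by omega)]
      ring

lemma fmA_fIdx : ∀ (l : List Int) (t M : Int), M ∈ l → (∀ x ∈ l, x ≤ M) → t < M →
    fmA t l = fIdx M l := by
  intro l
  induction l with
  | nil => intro t M hM _ _; simp at hM
  | cons v rest ih =>
    intro t M hM hbound htM
    simp only [fmA, fIdx]
    by_cases he : v = M
    · subst he
      rw [if_pos rfl,
          if_pos ⟨htM, List.all_eq_true.mpr (fun x hx =>
            decide_eq_true (hbound x (List.mem_cons_of_mem _ hx)))⟩]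
    · have hvM : v < M := lt_of_le_of_ne (hbound v List.mem_cons_self) he
      have hMrest : M ∈ rest := by
        rcases List.mem_cons.mp hM with rfl | h
        · exact absurd rfl he
        · exact h
      rw [if_neg he,
          if_neg (by
            rintro ⟨-, hall⟩
            have := List.all_eq_true.mp hall M hMrest
            simp at this; omega),
          ih (max t v) M hMrest (fun x hx => hbound x (List.mem_cons_of_mem _ hx))
            (by omega)]

lemma runsList_pos (s : List Int) : ∀ x ∈ runsList s, 1 ≤ x := by
  have cnt_nonneg : ∀ (prev : Int) (l : List Int), 0 ≤ cntGo prev l := by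
    intro prev l
    induction l generalizing prev with
    | nil => simp [cntGo]
    | cons v rest ih =>
      simp only [cntGo]
      split_ifs
      · have := ih v; omega
      · omega
  intro x hx
  unfold runsList at hx
  obtain ⟨i, hi, rfl⟩ := List.mem_map.mp hx
  have hi' : i < s.length := List.mem_range.mp hi
  have hne : s.drop i ≠ [] := by
    intro h
    have := List.drop_eq_nil_iff.mp h
    omega
  obtain ⟨v, rest, heq⟩ := List.exists_cons_of_ne_nil hne
  rw [heq]
  simp only [runD]
  have := cnt_nonneg v rest
  omega

-- ===== VERDICT (by name: the statement is the Claim_ definition above) =====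
theorem pos_secuencia_ordenada_mas_larga_spec : Claim_equal_pos_secuencia_ordenada_mas_larga := by
  intro s hdom

  unfold Spec_pos_secuencia_ordenada_mas_larga
  simp only [pos_secuencia_ordenada_mas_larga, pos_secuencia_ordenada_mas_larga_alt]
  rw [posiciones_eq s, runsB_eq s]
  by_cases hs : s = []
  · subst hs; simp [runsList, pvPosMaximo, pvArgmaxGo]
  · have hlen : 0 < s.length := List.length_pos_iff.mpr hs
    have hPlen : (runsList s).length = s.length := by simp [runsList]
    have hPne : runsList s ≠ [] := by
      intro h; rw [h] at hPlen; simp at hPlen; omega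
    have hpos := runsList_pos s
    have hM1 : pvMaximo (runsList s) ∈ runsList s := maximo_mem _ hPne
    have hM2 := maximo_bound _ hPne
    have hM3 : 0 < pvMaximo (runsList s) := by have := hpos _ hM1; omega
    have hA : pvPosMaximo (runsList s) = fIdx (pvMaximo (runsList s)) (runsList s) := by
      unfold pvPosMaximo
      rw [if_neg (by exact_mod_cast (by omega : (runsList s).length ≠ 0))]
      have := posMaximoGo_spec (runsList s).length (runsList s) 0 (pvMaximo (runsList s))
        (by omega) (by simpa using hM1)
      simpa using this
    have hB : pvArgmaxGo (runsList s) (-1) 0 0 = fIdx (pvMaximo (runsList s)) (runsList s) := by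
      rw [argmax_fmA (runsList s) (-1) 0 0 ⟨pvMaximo (runsList s), hM1, hM3⟩,
          fmA_fIdx (runsList s) 0 (pvMaximo (runsList s)) hM1 hM2 hM3]
      ring
    rw [hA, hB]
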